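-- pv_equiv track=rewrite | github.com/NIKAvar123/GOA | level 123/classwork/class.py | highest_rank
-- ===== SOURCE A (Python) =====
-- def highest_rank(arr):
--     counts = {}
--     for el in arr:
--         if el in counts:
--             counts[el] += 1
--         else:
--             counts[el] = 1
--     max_friq = max(counts.values())
--     arr1 = []
--     for num , count in counts.items():
--             if count == max_friq:
--                 arr1.append(num)
--     return max(arr1)
-- ===== SOURCE B (Python) =====
-- def highest_rank(arr):
--     s = sorted(arr)
--     best_val, best_len = s[0], 0
--     run_val, run_len = s[0], 0
--     for x in s:
--         if x == run_val:
--             run_len += 1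
--         else:
--             run_val, run_len = x, 1
--         if run_len >= best_len:
--             best_val, best_len = run_val, run_len
--     return best_val
-- ===== Notes on version B (the rewrite author's own statement) =====
-- stated objective: alternative
-- what changed: B drops the frequency dict entirely: it sorts the list and makes one run-length scan over the sorted copy, keeping the best (run length, value) seen; since equal elements are contiguous and values increase, the >= update yields the largest among the most frequent.
import Mathlib
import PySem

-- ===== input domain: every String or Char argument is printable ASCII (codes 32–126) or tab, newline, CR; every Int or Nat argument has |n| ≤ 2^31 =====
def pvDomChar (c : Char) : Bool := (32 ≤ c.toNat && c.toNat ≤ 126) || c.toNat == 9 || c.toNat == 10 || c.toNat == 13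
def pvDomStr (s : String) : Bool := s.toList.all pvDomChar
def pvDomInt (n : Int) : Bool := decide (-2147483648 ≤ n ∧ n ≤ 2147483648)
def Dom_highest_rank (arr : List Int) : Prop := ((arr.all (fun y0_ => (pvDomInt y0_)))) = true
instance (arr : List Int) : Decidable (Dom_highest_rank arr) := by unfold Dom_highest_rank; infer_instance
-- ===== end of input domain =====

-- B replaces the frequency dict and its three post-passes by sort + one run-length scan of the
-- sorted copy (same return value; objective: alternative algorithm, no speed claim).

-- ===== PORT A =====
def highest_rank (arr : List Int) : Int :=
  let counts := arr.foldl
    (fun d el => if d.contains el then d.modify el 0 (· + 1) else d.insert el 1)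
    (PySem.Dict.empty : PySem.Dict Int Int)
  -- Python 'max(counts.values())' raises ValueError on an empty dict; Pre_ excludes arr = [],
  -- so the 'none' branch of max? is unreachable and .getD 0 is never taken.
  let max_friq := (PySem.List.max? counts.values (fun v => v)).getD 0
  let arr1 := counts.items.foldl
    (fun acc p => if p.2 = max_friq then acc ++ [p.1] else acc) ([] : List Int)
  (PySem.List.max? arr1 (fun v => v)).getD 0

-- ===== PORT B =====
-- the loop body of Source B: state = (best_val, best_len, run_val, run_len)
def pvStepB (st : Int × Int × Int × Int) (x : Int) : Int × Int × Int × Int :=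
  let rv' := if x = st.2.2.1 then st.2.2.1 else x
  let rl' := if x = st.2.2.1 then st.2.2.2 + 1 else 1
  if st.2.1 ≤ rl' then (rv', rl', rv', rl') else (st.1, st.2.1, rv', rl')

def highest_rank_alt (arr : List Int) : Int :=
  let s := PySem.List.sorted arr (fun x => x) false
  -- Python 's[0]' raises IndexError on the empty list; Pre_ excludes arr = [].
  let h0 := (PySem.List.pyGet? s 0).getD 0
  (s.foldl pvStepB (h0, 0, h0, 0)).1

-- ===== PRECONDITION & SPEC =====
-- Pre_ excludes exactly the empty list, on which A raises ValueError and B raises IndexError.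
def Pre_highest_rank (arr : List Int) : Prop := arr ≠ []
instance (arr : List Int) : Decidable (Pre_highest_rank arr) := by unfold Pre_highest_rank; infer_instance
def pvWitness_highest_rank : List Int := ([3, 1, 3, 1, 2])

def Spec_highest_rank (arr : List Int) (out : Int) : Prop := out = highest_rank_alt arr
instance (arr : List Int) (out : Int) : Decidable (Spec_highest_rank arr out) := by unfold Spec_highest_rank; infer_instance

-- ===== CLAIM (what is proved, stated in full; the proofs are below) =====
def Claim_equal_highest_rank : Prop := ∀ (arr : List Int), Dom_highest_rank arr → Pre_highest_rank arr → Spec_highest_rank arr (highest_rank arr)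

-- ===== LEMMAS AND PROOFS =====

-- m is the largest element among those of maximal multiplicity in l (unique when it exists).
def pvIsBest (l : List Int) (m : Int) : Prop :=
  m ∈ l ∧ ∀ y ∈ l, l.count y < l.count m ∨ (l.count y = l.count m ∧ y ≤ m)

theorem pvIsBest_unique {l : List Int} {m1 m2 : Int}
    (h1 : pvIsBest l m1) (h2 : pvIsBest l m2) : m1 = m2 := by
  obtain ⟨hm1, ha1⟩ := h1
  obtain ⟨hm2, ha2⟩ := h2
  have a := ha1 m2 hm2
  have b := ha2 m1 hm1
  omega

-- ---------- A side ----------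

-- A's counting loop builds Counter(arr): the membership branch is the getD-upsert.
theorem pvFold_eq (arr : List Int) (d : PySem.Dict Int Int) :
    arr.foldl (fun d el => if d.contains el then d.modify el 0 (· + 1) else d.insert el 1) d
    = arr.foldl (fun d el => d.insert el (d.getD el 0 + 1)) d := by
  induction arr generalizing d with
  | nil => rfl
  | cons x t ih =>
    simp only [List.foldl_cons]
    by_cases h : d.contains x = true
    · rw [if_pos h]; exact ih _
    · rw [if_neg h]
      rw [PySem.Dict.getD_of_not_contains d 0 (by simpa using h)]
      exact ih _

-- Lex comparison used in the argmax characterisation.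
def pvLe (f : Int → Int) (y m : Int) : Prop := f y < f m ∨ (f y = f m ∧ y ≤ m)

-- The fold step of PySem.List.max2? with keys (f k, k), written out.
def pvStep (f : Int → Int) : Option Int → Int → Option Int := fun acc x =>
  match acc with
  | none => some x
  | some m => if (decide (f m < f x) || !decide (f x < f m) && decide (m < x)) = true
              then some x else some m

theorem pvMax2_unfold (f : Int → Int) (y : Int) (ks : List Int) :
    PySem.List.max2? (y :: ks) f (fun k => k) = ks.foldl (pvStep f) (some y) := by
  show List.foldl _ (some y) ks = _
  congr 1
  funext acc x
  cases acc <;> rfl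

theorem pvStep_some (f : Int → Int) (a x : Int) :
    pvStep f (some a) x = if f a < f x ∨ (¬ f x < f a ∧ a < x) then some x else some a := by
  show (if (decide (f a < f x) || !decide (f x < f a) && decide (a < x)) = true
        then some x else some a) = _
  by_cases h : f a < f x ∨ (¬ f x < f a ∧ a < x)
  · rw [if_pos h, if_pos]
    simp only [Bool.or_eq_true, Bool.and_eq_true, Bool.not_eq_eq_eq_not, Bool.not_true,
      decide_eq_true_eq, decide_eq_false_iff_not]
    tauto
  · rw [if_neg h, if_neg]
    simp only [Bool.or_eq_true, Bool.and_eq_true, Bool.not_eq_eq_eq_not, Bool.not_true,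
      decide_eq_true_eq, decide_eq_false_iff_not]
    tauto

theorem pvMax2_aux (f : Int → Int) (ks : List Int) : ∀ (a : Int),
    ∃ m, ks.foldl (pvStep f) (some a) = some m ∧
      (m = a ∨ m ∈ ks) ∧ pvLe f a m ∧ ∀ y ∈ ks, pvLe f y m := by
  induction ks with
  | nil =>
    intro a
    exact ⟨a, rfl, Or.inl rfl, Or.inr ⟨rfl, le_refl a⟩, by simp⟩
  | cons x t ih =>
    intro a
    rw [List.foldl_cons, pvStep_some]
    by_cases hc : f a < f x ∨ (¬ f x < f a ∧ a < x)
    · rw [if_pos hc]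
      obtain ⟨m, hm, hmem, hle, hall⟩ := ih x
      refine ⟨m, hm, ?_, ?_, ?_⟩
      · rcases hmem with h | h
        · exact Or.inr (by simp [h])
        · exact Or.inr (List.mem_cons_of_mem _ h)
      · simp only [pvLe] at hle ⊢; omega
      · intro y hy
        rcases List.mem_cons.mp hy with h | h
        · subst h; exact hle
        · exact hall y h
    · rw [if_neg hc]
      obtain ⟨m, hm, hmem, hle, hall⟩ := ih a
      refine ⟨m, hm, ?_, hle, ?_⟩
      · rcases hmem with h | h
        · exact Or.inl h
        · exact Or.inr (List.mem_cons_of_mem _ h)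
      · intro y hy
        rcases List.mem_cons.mp hy with h | h
        · subst h; simp only [pvLe] at hle ⊢; omega
        · exact hall y h

-- A's max-of-values / filter / max-of-keys tail equals one lex-maximal selection over the keys.
theorem pvTail_eq (ks : List Int) (f : Int → Int) (hne : ks ≠ []) :
    (PySem.List.max?
      (ks.foldl (fun acc k => if f k = (PySem.List.max? (ks.map f) (fun v => v)).getD 0
                              then acc ++ [k] else acc) [])
      (fun v => v)).getD 0
    = (PySem.List.max2? ks f (fun k => k)).getD 0 := by
  obtain ⟨k0, t, rfl⟩ := List.exists_cons_of_ne_nil hne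
  obtain ⟨b, hb, hbmem, hble, hball⟩ := pvMax2_aux f t k0
  obtain ⟨M, hM⟩ : ∃ M, PySem.List.max? ((k0 :: t).map f) (fun v => v) = some M := by
    cases h : PySem.List.max? ((k0 :: t).map f) (fun v => v) with
    | none => simp [PySem.List.max?_eq_none_iff] at h
    | some m => exact ⟨m, rfl⟩
  have hMmem : M ∈ (k0 :: t).map f := PySem.List.max?_mem hM
  have hMmax : ∀ y ∈ (k0 :: t).map f, y ≤ M := fun y hy => PySem.List.max?_isMax hM y hy
  have hbmem' : b ∈ (k0 :: t) := by
    rcases hbmem with h | h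
    · simp [h]
    · exact List.mem_cons_of_mem _ h
  have hfb : f b = M := by
    have h1 : f b ≤ M := hMmax _ (List.mem_map_of_mem hbmem')
    obtain ⟨z, hz, hzM⟩ := List.mem_map.mp hMmem
    have h2 : pvLe f z b := by
      rcases List.mem_cons.mp hz with h | h
      · subst h; exact hble
      · exact hball z h
    simp only [pvLe] at h2; omega
  rw [hM, Option.getD_some]
  have hfilter : (k0 :: t).foldl (fun acc k => if f k = M then acc ++ [k] else acc) []
      = (k0 :: t).filter (fun k => decide (f k = M)) := by
    simpa using PySem.List.foldl_append_if (fun k => decide (f k = M)) (fun k : Int => k) (k0 :: t) []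
  rw [hfilter]
  have hbfil : b ∈ (k0 :: t).filter (fun k => decide (f k = M)) := by
    simp [List.mem_filter, hbmem', hfb]
  obtain ⟨a, ha⟩ : ∃ a, PySem.List.max?
      ((k0 :: t).filter (fun k => decide (f k = M))) (fun v => v) = some a := by
    cases h : PySem.List.max? ((k0 :: t).filter (fun k => decide (f k = M))) (fun v => v) with
    | none =>
      rw [PySem.List.max?_eq_none_iff] at h
      rw [h] at hbfil; simp at hbfil
    | some m => exact ⟨m, rfl⟩
  have hamem := PySem.List.max?_mem ha
  have hba : b ≤ a := PySem.List.max?_isMax ha b hbfil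
  simp only [List.mem_filter, decide_eq_true_eq] at hamem
  have hab : a ≤ b := by
    have h2 : pvLe f a b := by
      rcases List.mem_cons.mp hamem.1 with h | h
      · subst h; exact hble
      · exact hball a h
    simp only [pvLe] at h2; omega
  rw [ha, pvMax2_unfold f k0 t, hb]
  simp only [Option.getD_some]
  omega

theorem pvA_isBest (arr : List Int) (hpre : arr ≠ []) : pvIsBest arr (highest_rank arr) := by
  dsimp only [highest_rank]
  rw [pvFold_eq, PySem.Dict.foldl_insert_getD_add_one_eq_counter]
  have hnd : (PySem.Dict.counter arr).keys.Nodup := PySem.Dict.nodup_keys_counter arr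
  have hmemk : ∀ x : Int, x ∈ (PySem.Dict.counter arr).keys ↔ x ∈ arr := by
    intro x
    rw [PySem.Dict.keys_counter]
    simp [PySem.Set.mem_ofList]
  have hkne : (PySem.Dict.counter arr).keys ≠ [] := by
    obtain ⟨a, t, rfl⟩ := List.exists_cons_of_ne_nil hpre
    exact List.ne_nil_of_mem ((hmemk a).mpr (by simp))
  have hf : ∀ k : Int, (PySem.Dict.counter arr).getD k 0 = (arr.count k : Int) := fun k =>
    PySem.Dict.getD_counter arr k
  rw [PySem.Dict.values_eq_map_keys _ hnd 0, PySem.Dict.items_eq_map_keys _ hnd 0, List.foldl_map]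
  have h := pvTail_eq (PySem.Dict.counter arr).keys (fun k => (PySem.Dict.counter arr).getD k 0) hkne
  dsimp only at h ⊢
  rw [h]
  obtain ⟨k0, t, hkt⟩ := List.exists_cons_of_ne_nil hkne
  rw [hkt, pvMax2_unfold]
  obtain ⟨m, hm, hmem, hle, hall⟩ := pvMax2_aux (fun k => (PySem.Dict.counter arr).getD k 0) t k0
  rw [hm, Option.getD_some]
  have hmk : m ∈ (PySem.Dict.counter arr).keys := by
    rw [hkt]
    rcases hmem with hh | hh
    · simp [hh]
    · exact List.mem_cons_of_mem _ hh
  refine ⟨(hmemk m).mp hmk, ?_⟩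
  intro y hy
  have hyk : y ∈ (PySem.Dict.counter arr).keys := (hmemk y).mpr hy
  have hply : pvLe (fun k => (PySem.Dict.counter arr).getD k 0) y m := by
    rw [hkt] at hyk
    rcases List.mem_cons.mp hyk with hh | hh
    · subst hh; exact hle
    · exact hall y hh
  simp only [pvLe, hf] at hply
  omega

-- ---------- B side ----------

-- loop invariant of Source B's scan over the processed (sorted) prefix p
def pvInv (p : List Int) (st : Int × Int × Int × Int) : Prop :=
  st.2.2.1 ∈ p ∧ (∀ y ∈ p, y ≤ st.2.2.1) ∧ st.2.2.2 = (p.count st.2.2.1 : Int) ∧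
  st.1 ∈ p ∧ st.2.1 = (p.count st.1 : Int) ∧
  ∀ y ∈ p, ((p.count y : Int) < st.2.1 ∨ ((p.count y : Int) = st.2.1 ∧ y ≤ st.1))

theorem pvCount_append (p : List Int) (x y : Int) :
    ((p ++ [x]).count y : Int) = (p.count y : Int) + if y = x then 1 else 0 := by
  rw [List.count_append]
  by_cases h : y = x
  · subst h; simp
  · have h2 : ¬(x = y) := fun hh => h hh.symm
    simp [h, h2]

theorem pvStepB_inv (p : List Int) (st : Int × Int × Int × Int) (x : Int)
    (hx : ∀ y ∈ p, y ≤ x) (hinv : pvInv p st) : pvInv (p ++ [x]) (pvStepB st x) := by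
  obtain ⟨bv, bl, rv, rl⟩ := st
  obtain ⟨hrv, hmax, hrl, hbv, hbl, hall⟩ := hinv
  dsimp only at hrv hmax hrl hbv hbl hall
  have hrx : rv ≤ x := hx rv hrv
  by_cases hxr : x = rv
  · -- the run continues
    subst hxr
    have hcx : ∀ y ∈ p, y ≠ x → ((p ++ [x]).count y : Int) = (p.count y : Int) := by
      intro y _ hy
      rw [pvCount_append]; simp [hy]
    have hcxx : ((p ++ [x]).count x : Int) = (p.count x : Int) + 1 := by
      rw [pvCount_append]; simp
    simp only [pvStepB, if_true]
    by_cases hup : bl ≤ rl + 1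
    · rw [if_pos hup]
      refine ⟨by simp, ?_, by dsimp only; omega, by simp, by dsimp only; omega, ?_⟩
      · intro y hy
        rcases List.mem_append.mp hy with hh | hh
        · exact le_trans (hmax y hh) hrx
        · dsimp only; simp at hh; subst hh; omega
      · intro y hy
        dsimp only
        rcases List.mem_append.mp hy with hh | hh
        · by_cases hyx : y = x
          · subst hyx; omega
          · rw [hcx y hh hyx]
            have := hall y hh
            have hybv : y ≤ x := le_trans (hmax y hh) hrx
            have hcbv : ((p ++ [x]).count bv : Int) ≥ (p.count bv : Int) := by
              rw [pvCount_append]; split <;> omega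
            omega
        · simp at hh; subst hh; omega
    · rw [if_neg hup]
      have hbvx : bv ≠ x := by
        intro h; subst h; omega
      refine ⟨by simp, ?_, by dsimp only; omega, by simp [hbv], ?_, ?_⟩
      · intro y hy
        rcases List.mem_append.mp hy with hh | hh
        · exact le_trans (hmax y hh) hrx
        · dsimp only; simp at hh; subst hh; omega
      · dsimp only; rw [hcx bv hbv hbvx]; omega
      · intro y hy
        dsimp only
        rcases List.mem_append.mp hy with hh | hh
        · by_cases hyx : y = x
          · subst hyx; rw [hcxx]; omega
          · rw [hcx y hh hyx]
            exact hall y hh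
        · simp at hh; subst hh; rw [hcxx]; omega
  · -- a new, strictly larger value starts a run of length 1
    have hxnp : x ∉ p := by
      intro hmem
      exact hxr (le_antisymm (hmax x hmem) hrx)
    have hc0 : (p.count x : Int) = 0 := by
      rw [List.count_eq_zero.mpr hxnp]; rfl
    have hcx : ∀ y ∈ p, ((p ++ [x]).count y : Int) = (p.count y : Int) := by
      intro y hy
      rw [pvCount_append]
      have : y ≠ x := fun h => hxnp (h ▸ hy)
      simp [this]
    have hcxx : ((p ++ [x]).count x : Int) = 1 := by
      rw [pvCount_append]; simp; omega
    simp only [pvStepB, if_neg hxr]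
    have hcy1 : ∀ y ∈ p, (1 : Int) ≤ (p.count y : Int) := by
      intro y hy
      have := List.count_pos_iff.mpr hy
      omega
    by_cases hup : bl ≤ 1
    · rw [if_pos hup]
      refine ⟨by simp, ?_, by dsimp only; rw [hcxx], by simp, by dsimp only; rw [hcxx], ?_⟩
      · intro y hy
        rcases List.mem_append.mp hy with hh | hh
        · exact hx y hh
        · dsimp only; simp at hh; subst hh; omega
      · intro y hy
        dsimp only
        rcases List.mem_append.mp hy with hh | hh
        · rw [hcx y hh]
          have := hall y hh
          have := hcy1 y hh
          have := hcy1 bv hbv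
          have : y ≤ x := hx y hh
          omega
        · simp at hh; subst hh; rw [hcxx]; omega
    · rw [if_neg hup]
      refine ⟨by simp, ?_, by dsimp only; rw [hcxx], by simp [hbv], ?_, ?_⟩
      · intro y hy
        rcases List.mem_append.mp hy with hh | hh
        · exact hx y hh
        · dsimp only; simp at hh; subst hh; omega
      · dsimp only; rw [hcx bv hbv]; omega
      · intro y hy
        dsimp only
        rcases List.mem_append.mp hy with hh | hh
        · rw [hcx y hh]
          exact hall y hh
        · simp at hh; subst hh; rw [hcxx]; omega

theorem pvScan (rest : List Int) : ∀ (p : List Int) (st : Int × Int × Int × Int),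
    (p ++ rest).Pairwise (· ≤ ·) → pvInv p st →
    pvInv (p ++ rest) (rest.foldl pvStepB st) := by
  induction rest with
  | nil => intro p st _ h; simpa using h
  | cons x t ih =>
    intro p st hpw hinv
    have h1 : p ++ x :: t = (p ++ [x]) ++ t := by simp
    rw [h1] at hpw ⊢
    rw [List.foldl_cons]
    refine ih (p ++ [x]) (pvStepB st x) hpw (pvStepB_inv p st x ?_ hinv)
    intro y hy
    rw [← h1] at hpw
    have := (List.pairwise_append.mp hpw).2.2
    exact this y hy x (by simp)

theorem pvB_isBest (arr : List Int) (hpre : arr ≠ []) : pvIsBest arr (highest_rank_alt arr) := by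
  dsimp only [highest_rank_alt]
  have hsne : PySem.List.sorted arr (fun x => x) false ≠ [] := by
    rw [Ne, PySem.List.sorted_eq_nil_iff]
    exact hpre
  obtain ⟨s0, t, hst⟩ := List.exists_cons_of_ne_nil hsne
  have hperm : (PySem.List.sorted arr (fun x => x) false).Perm arr :=
    PySem.List.sorted_perm arr (fun x => x) false
  have hpw : (PySem.List.sorted arr (fun x => x) false).Pairwise (· ≤ ·) :=
    PySem.List.sorted_pairwise arr (fun x => x)
  have hget : (PySem.List.pyGet? (PySem.List.sorted arr (fun x => x) false) 0).getD 0 = s0 := by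
    rw [hst]
    simp [PySem.List.pyGet?, PySem.List.pyIdx?]
  rw [hget, hst, List.foldl_cons]
  have h1 : pvStepB (s0, 0, s0, 0) s0 = (s0, 1, s0, 1) := by
    simp [pvStepB]
  rw [h1]
  have hinv1 : pvInv [s0] (s0, 1, s0, 1) := by
    refine ⟨by simp, by simp, by simp, by simp, by simp, ?_⟩
    intro y hy
    simp at hy
    subst hy
    simp
  have hpw' : ([s0] ++ t).Pairwise (· ≤ ·) := by
    have h2 := hpw
    rw [hst] at h2
    simpa using h2
  have hfin := pvScan t [s0] (s0, 1, s0, 1) hpw' hinv1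
  obtain ⟨_, _, _, hbv, hbl, hall⟩ := hfin
  have hseq : [s0] ++ t = PySem.List.sorted arr (fun x => x) false := by rw [hst]; rfl
  rw [hseq] at hbv hbl hall
  refine ⟨hperm.mem_iff.mp hbv, ?_⟩
  intro y hy
  have hy' : y ∈ PySem.List.sorted arr (fun x => x) false := hperm.mem_iff.mpr hy
  have := hall y hy'
  have hc1 := hperm.count_eq y
  have hc2 := hperm.count_eq (t.foldl pvStepB (s0, 1, s0, 1)).1
  omega

-- ===== VERDICT (by name: the statement is the Claim_ definition above) =====
theorem highest_rank_spec : Claim_equal_highest_rank := by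
  intro arr _ hpre
  unfold Spec_highest_rank
  exact pvIsBest_unique (pvA_isBest arr hpre) (pvB_isBest arr hpre)
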